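-- pv_equiv track=rewrite | github.com/chvjak/hr-practice | the-grid-search.py | is_grid_in_grid
-- ===== SOURCE A (Python) =====
-- def is_grid_in_grid(needle, hs):
--     hs_i1 = 0
--     ix = 0
--     while True:
--         while hs_i1 + len(needle) - 1 < len(hs) and hs[hs_i1].find(needle[0], ix) == -1:
--             hs_i1 += 1
--             ix = 0
--
--         if hs_i1 + len(needle) - 1 == len(hs):
--             return False
--
--         ix = hs[hs_i1].find(needle[0], ix)
--
--         n_i = 1
--         hs_i = hs_i1 + 1
--         while n_i < len(needle) and hs_i < len(hs) and hs[hs_i][ix:ix+len(needle[0])] == needle[n_i]: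
--             n_i += 1
--             hs_i += 1
--
--         if n_i == len(needle):
--             return True
--         else:
--             ix += 1
-- ===== SOURCE B (Python) =====
-- def is_grid_in_grid(needle, hs):
--     # Column-major search: for each column offset j, cut every haystack row to its
--     # width-w window starting at j, and look for needle as a contiguous run there.
--     w = len(needle[0])
--     width = max((len(row) for row in hs), default=0)
--     R = len(needle)
--     for j in range(width + 1):
--         col = [row[j:j + w] for row in hs]
--         for i in range(len(col) - R + 1):
--             if col[i:i + R] == needle:
--                 return True
--     return False
-- ===== Notes on version B (the rewrite author's own statement) =====
-- stated objective: alternative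
-- what changed: A scans row-major with str.find restart/backtrack state (hs_i1, ix); B instead iterates column offsets, cuts every haystack row to its width-w window at that offset, and does a plain 1-D contiguous-sublist comparison down the column.
import Mathlib
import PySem

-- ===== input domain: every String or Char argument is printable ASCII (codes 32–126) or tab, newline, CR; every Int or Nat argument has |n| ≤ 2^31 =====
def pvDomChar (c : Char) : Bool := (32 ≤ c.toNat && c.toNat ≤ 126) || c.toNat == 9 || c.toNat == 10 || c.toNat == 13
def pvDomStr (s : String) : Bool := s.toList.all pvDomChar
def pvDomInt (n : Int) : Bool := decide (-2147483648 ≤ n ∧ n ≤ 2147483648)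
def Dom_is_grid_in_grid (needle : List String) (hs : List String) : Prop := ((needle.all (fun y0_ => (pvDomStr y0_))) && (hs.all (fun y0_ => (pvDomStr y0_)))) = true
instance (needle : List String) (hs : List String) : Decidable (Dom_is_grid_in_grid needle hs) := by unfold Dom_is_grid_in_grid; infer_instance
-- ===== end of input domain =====

-- B re-implements the search column-major (fixed-width windows of every row at offset j,
-- then a contiguous-run comparison down that column); same value as A on Pre_; objective: alternative.

-- ===== PORT A =====
def pvRow (hs : List String) (i : Nat) : List Char := (hs.getD i "").toList

-- inner `while`: advance hs_i1 (resetting ix) while the window fits strictly and needle[0] is absent from ix on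
def aAdvance (needle hs : List String) : Nat → Nat → Nat → Nat × Nat
  | 0, i, ix => (i, ix)
  | fuel+1, i, ix =>
    if ((i : Int) + needle.length - 1 < hs.length) ∧
       PySem.Chars.findFrom (pvRow hs i) (needle.getD 0 "").toList (ix : Int) none = -1
    then aAdvance needle hs fuel (i+1) 0
    else (i, ix)

-- match `while`: n_i, hs_i walk down while rows slice-match; returns the final n_i
def aMatch (needle hs : List String) (ix : Nat) : Nat → Nat → Nat → Nat
  | 0, n_i, _ => n_i
  | fuel+1, n_i, hs_i =>
    if n_i < needle.length ∧ hs_i < hs.length ∧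
       PySem.Chars.slice (pvRow hs hs_i) (some (ix : Int))
         (some ((ix : Int) + ((needle.getD 0 "").length : Int))) = (needle.getD n_i "").toList
    then aMatch needle hs ix fuel (n_i+1) (hs_i+1)
    else n_i

-- max row length (used to bound the fuel of the outer loop; B computes the same value for its column range)
def pvWidth (hs : List String) : Nat := (hs.map (fun r => r.toList.length)).foldl max 0

-- outer `while True`; the fuel only totalizes the recursion (inside Pre_ every iteration moves (hs_i1, ix) strictly lexicographically, see pvLoop_spec)
def aLoop (needle hs : List String) : Nat → Nat → Nat → Bool
  | 0, _, _ => false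
  | fuel+1, i, ix =>
    let p := aAdvance needle hs (hs.length + 1) i ix
    if ((p.1 : Int) + needle.length - 1 = hs.length) then false
    else
      let j := (PySem.Chars.findFrom (pvRow hs p.1) (needle.getD 0 "").toList (p.2 : Int) none).toNat
      if aMatch needle hs j needle.length 1 (p.1 + 1) = needle.length then true
      else aLoop needle hs fuel p.1 (j + 1)

def is_grid_in_grid (needle : List String) (hs : List String) : Bool :=
  aLoop needle hs ((hs.length + 1) * (pvWidth hs + 2) + 1) 0 0

-- ===== PORT B =====
def is_grid_in_grid_alt (needle : List String) (hs : List String) : Bool :=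
  let w := (needle.getD 0 "").length
  let width := pvWidth hs
  let r := needle.length
  (List.range (width + 1)).any (fun j =>
    let col := hs.map (fun row => PySem.Chars.slice row.toList (some (j : Int)) (some ((j : Int) + (w : Int))))
    (List.range (hs.length + 1 - r)).any (fun i =>
      decide (PySem.List.slice col (some (i : Int)) (some ((i : Int) + (r : Int))) = needle.map String.toList)))

-- ===== PRECONDITION & SPEC =====
-- Pre_ excludes needle = [] (A raises IndexError evaluating needle[0]) and needles taller than
-- len(hs)+1 (there A loops forever, or raises IndexError when hs is empty); A returns on everything else.
def Pre_is_grid_in_grid (needle : List String) (hs : List String) : Prop :=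
  needle ≠ [] ∧ needle.length ≤ hs.length + 1
instance (needle : List String) (hs : List String) : Decidable (Pre_is_grid_in_grid needle hs) := by
  unfold Pre_is_grid_in_grid; infer_instance

def pvWitness_is_grid_in_grid : List String × List String := (["ab"], ["cab", "xab"])

def Spec_is_grid_in_grid (needle : List String) (hs : List String) (out : Bool) : Prop := out = is_grid_in_grid_alt needle hs
instance (needle : List String) (hs : List String) (out : Bool) : Decidable (Spec_is_grid_in_grid needle hs out) := by unfold Spec_is_grid_in_grid; infer_instance

-- ===== CLAIM (what is proved, stated in full; the proofs are below) =====
def Claim_equal_is_grid_in_grid : Prop := ∀ (needle : List String) (hs : List String), Dom_is_grid_in_grid needle hs → Pre_is_grid_in_grid needle hs → Spec_is_grid_in_grid needle hs (is_grid_in_grid needle hs)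

-- ===== LEMMAS AND PROOFS =====

-- the block-match predicate whose existence both programs decide
def pvMatchAt (needle hs : List String) (i j : Nat) : Prop :=
  ∀ k < needle.length,
    PySem.Chars.slice (pvRow hs (i+k)) (some (j : Int))
      (some ((j : Int) + ((needle.getD 0 "").length : Int))) = (needle.getD k "").toList

-- what A still scans from state (i, ix)
def pvRest (needle hs : List String) (i ix : Nat) : Prop :=
  ∃ i' j : Nat, i ≤ i' ∧ i' + needle.length ≤ hs.length ∧ (i' = i → ix ≤ j) ∧ pvMatchAt needle hs i' j

-- needle[0] occurs in row i at column j
def pvOcc (needle hs : List String) (i j : Nat) : Prop :=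
  (needle.getD 0 "").toList <+: (pvRow hs i).drop j

-- reachability invariant on A state: ix = 0, or some occurrence before ix failed to extend
def pvC (needle hs : List String) (i ix : Nat) : Prop :=
  ix = 0 ∨ ∃ j0 < ix, pvOcc needle hs i j0 ∧ ¬ pvMatchAt needle hs i j0

theorem pvFindFrom_gt_len (s sub : List Char) (k : Nat) (h : s.length < k) :
    PySem.Chars.findFrom s sub (k : Int) none = -1 := by
  unfold PySem.Chars.findFrom
  have h1 : ¬ ((k:Int) < 0) := by omega
  simp only [h1, if_false]
  rw [if_pos (by exact_mod_cast h)]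

theorem pvSlice_nat (l : List Char) (j : Nat) (w : Nat) :
    PySem.Chars.slice l (some (j : Int)) (some ((j : Int) + (w : Int))) = (l.drop j).take w := by
  rw [PySem.Chars.slice_eq_listSlice, PySem.List.slice_natCast_add]

theorem pvLen_cast (s : String) : ((s.length : Nat) : Int) = ((s.toList.length : Nat) : Int) := by simp

theorem pvMatchAt_occ (needle hs : List String) (i j : Nat) (hR : needle ≠ [])
    (h : pvMatchAt needle hs i j) : pvOcc needle hs i j := by
  have h0 := h 0 (by cases needle with | nil => exact absurd rfl hR | cons a l => simp)
  rw [pvLen_cast, pvSlice_nat] at h0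
  simp only [Nat.add_zero] at h0
  calc (needle.getD 0 "").toList
      = ((pvRow hs i).drop j).take (needle.getD 0 "").toList.length := h0.symm
    _ <+: (pvRow hs i).drop j := List.take_prefix _ _

theorem pvOcc_slice (needle hs : List String) (i j : Nat) (h : pvOcc needle hs i j) :
    PySem.Chars.slice (pvRow hs i) (some (j : Int))
      (some ((j : Int) + ((needle.getD 0 "").length : Int))) = (needle.getD 0 "").toList := by
  rw [pvLen_cast, pvSlice_nat]
  exact (List.prefix_iff_eq_take.mp h).symm

-- a match whose column lies past the end of row i forces an all-empty needle, hence matches everywhere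

-- a match whose column lies past the end of row i forces an all-empty needle, which matches everywhere
theorem pvMatchAt_high (needle hs : List String) (i j : Nat) (hR : needle ≠ [])
    (hj : (pvRow hs i).length ≤ j) (h : pvMatchAt needle hs i j) :
    ∀ i'' j'', pvMatchAt needle hs i'' j'' := by
  have h0ne : 0 < needle.length := by cases needle with | nil => exact absurd rfl hR | cons a l => simp
  have h0 := h 0 h0ne
  rw [pvLen_cast, pvSlice_nat] at h0
  simp only [Nat.add_zero, List.drop_eq_nil_of_le hj, List.take_nil] at h0
  have hw : (needle.getD 0 "").toList.length = 0 := by rw [← h0]; rfl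
  intro i'' j'' k hk
  have hk2 := h k hk
  rw [pvLen_cast, pvSlice_nat, hw] at hk2 ⊢
  simp only [List.take_zero] at hk2 ⊢
  exact hk2

-- if needle[0] is not found in row i from ix on, no block match starts in row i at column ≥ ix

-- if needle[0] is not found in row i from ix on, no block match starts in row i at a column ≥ ix
theorem pvNoMatch_of_find_neg (needle hs : List String) (i ix : Nat) (hR : needle ≠ [])
    (hfind : PySem.Chars.findFrom (pvRow hs i) (needle.getD 0 "").toList (ix : Int) none = -1)
    (hC : pvC needle hs i ix) : ∀ j, ix ≤ j → ¬ pvMatchAt needle hs i j := by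
  intro j hij hM
  by_cases hlen : ix ≤ (pvRow hs i).length
  · have hni := (PySem.Chars.findFrom_natCast_eq_neg_one_iff (pvRow hs i) (needle.getD 0 "").toList ix hlen).mp hfind
    apply hni
    have hocc := pvMatchAt_occ needle hs i j hR hM
    unfold pvOcc at hocc
    have hdd : (pvRow hs i).drop j = ((pvRow hs i).drop ix).drop (j - ix) := by
      rw [List.drop_drop]; congr 1; omega
    rw [hdd] at hocc
    exact hocc.isInfix.trans (List.drop_suffix _ _).isInfix
  · -- ix past the row: reachable only when some earlier occurrence failed, but then the
    -- needle is all-empty and matches everywhere, contradiction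
    have hj : (pvRow hs i).length ≤ j := by omega
    rcases hC with h0 | ⟨j0, _, _, hnm⟩
    · omega
    · exact hnm (pvMatchAt_high needle hs i j hR hj hM i j0)

theorem pvAdvance_spec (needle hs : List String) (hR : needle ≠ []) :
    ∀ (fuel i ix : Nat), i + needle.length ≤ hs.length + 1 →
    hs.length + 1 - i ≤ fuel → pvC needle hs i ix →
    i ≤ (aAdvance needle hs fuel i ix).1 ∧
    (aAdvance needle hs fuel i ix).1 + needle.length ≤ hs.length + 1 ∧
    ((aAdvance needle hs fuel i ix).1 = i → (aAdvance needle hs fuel i ix).2 = ix) ∧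
    ((aAdvance needle hs fuel i ix).1 ≠ i → (aAdvance needle hs fuel i ix).2 = 0) ∧
    (pvRest needle hs i ix ↔ pvRest needle hs (aAdvance needle hs fuel i ix).1 (aAdvance needle hs fuel i ix).2) ∧
    pvC needle hs (aAdvance needle hs fuel i ix).1 (aAdvance needle hs fuel i ix).2 ∧
    ¬ ((((aAdvance needle hs fuel i ix).1 : Int) + needle.length - 1 < hs.length) ∧
       PySem.Chars.findFrom (pvRow hs (aAdvance needle hs fuel i ix).1) (needle.getD 0 "").toList
         ((aAdvance needle hs fuel i ix).2 : Int) none = -1) := by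
  intro fuel
  induction fuel with
  | zero =>
    intro i ix hiN hfuel hC
    have hRpos : 0 < needle.length := by cases needle with | nil => exact absurd rfl hR | cons a l => simp
    omega
  | succ fuel ih =>
    intro i ix hiN hfuel hC
    have hRpos : 0 < needle.length := by cases needle with | nil => exact absurd rfl hR | cons a l => simp
    by_cases hg : (((i : Int) + needle.length - 1 < hs.length) ∧
        PySem.Chars.findFrom (pvRow hs i) (needle.getD 0 "").toList (ix : Int) none = -1)
    · have hstep : aAdvance needle hs (fuel+1) i ix = aAdvance needle hs fuel (i+1) 0 := by
        simp only [aAdvance, if_pos hg]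
      have hi1 : i + 1 + needle.length ≤ hs.length + 1 := by
        have := hg.1; omega
      have hrec := ih (i+1) 0 hi1 (by omega) (Or.inl rfl)
      rw [hstep]
      refine ⟨by omega, hrec.2.1, ?_, ?_, ?_, hrec.2.2.2.2.2.1, hrec.2.2.2.2.2.2⟩
      · intro h; exfalso; omega
      · intro _
        by_cases hii : (aAdvance needle hs fuel (i+1) 0).1 = i + 1
        · rw [hrec.2.2.1 hii]
        · exact hrec.2.2.2.1 hii
      · rw [← hrec.2.2.2.2.1]
        have hnm := pvNoMatch_of_find_neg needle hs i ix hR hg.2 hC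
        constructor
        · rintro ⟨i', j, hii', hlen, hix, hM⟩
          rcases Nat.lt_or_ge i i' with hlt | hge
          · exact ⟨i', j, by omega, hlen, by intro h; omega, hM⟩
          · exfalso; exact hnm j (hix (by omega)) (by
              have : i' = i := by omega
              rwa [this] at hM)
        · rintro ⟨i', j, hii', hlen, hix, hM⟩
          exact ⟨i', j, by omega, hlen, by intro h; omega, hM⟩
    · have hstep : aAdvance needle hs (fuel+1) i ix = (i, ix) := by
        simp only [aAdvance, if_neg hg]
      rw [hstep]
      exact ⟨le_refl i, hiN, fun _ => rfl, fun h => absurd rfl h, Iff.rfl, hC, hg⟩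

theorem pvMatch_spec (needle hs : List String) (i j : Nat) (hiN : i + needle.length ≤ hs.length) :
    ∀ fuel ni, 1 ≤ ni → ni ≤ needle.length → needle.length - ni ≤ fuel →
    (aMatch needle hs j fuel ni (i + ni) = needle.length ↔
      ∀ k, ni ≤ k → k < needle.length →
        PySem.Chars.slice (pvRow hs (i+k)) (some (j : Int))
          (some ((j : Int) + ((needle.getD 0 "").length : Int))) = (needle.getD k "").toList) := by
  intro fuel
  induction fuel with
  | zero =>
    intro ni h1 h2 h3
    have hni : ni = needle.length := by omega
    subst hni
    simp only [aMatch]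
    exact ⟨fun _ k hk1 hk2 => by omega, fun _ => trivial⟩
  | succ fuel ih =>
    intro ni h1 h2 h3
    by_cases hlt : ni < needle.length
    · have hrow : i + ni < hs.length := by omega
      by_cases heq : PySem.Chars.slice (pvRow hs (i+ni)) (some (j : Int))
          (some ((j : Int) + ((needle.getD 0 "").length : Int))) = (needle.getD ni "").toList
      · have hstep : aMatch needle hs j (fuel+1) ni (i+ni) = aMatch needle hs j fuel (ni+1) (i+(ni+1)) := by
          simp only [aMatch, if_pos (⟨hlt, hrow, heq⟩ :
            ni < needle.length ∧ i + ni < hs.length ∧ _)]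
          congr 1
        rw [hstep, ih (ni+1) (by omega) (by omega) (by omega)]
        constructor
        · intro hall k hk1 hk2
          rcases Nat.eq_or_lt_of_le hk1 with hk | hk
          · rwa [← hk]
          · exact hall k (by omega) hk2
        · intro hall k hk1 hk2
          exact hall k (by omega) hk2
      · have hstep : aMatch needle hs j (fuel+1) ni (i+ni) = ni := by
          simp only [aMatch]
          rw [if_neg]
          intro hcon
          exact heq hcon.2.2
        rw [hstep]
        constructor
        · intro h; omega
        · intro hall
          exact absurd (hall ni (le_refl ni) hlt) heq
    · have hni : ni = needle.length := by omega
      subst hni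
      have hstep : aMatch needle hs j (fuel+1) (needle.length) (i+needle.length) = needle.length := by
        simp only [aMatch]
        rw [if_neg]
        intro hcon
        exact absurd hcon.1 (by omega)
      rw [hstep]
      exact ⟨fun _ k hk1 hk2 => by omega, fun _ => rfl⟩

theorem pvFindFrom_found (s sub : List Char) (ix : Nat)
    (h : PySem.Chars.findFrom s sub (ix : Int) none ≠ -1) :
    ix ≤ s.length ∧
    (ix : Int) ≤ PySem.Chars.findFrom s sub (ix : Int) none ∧
    (PySem.Chars.findFrom s sub (ix : Int) none).toNat ≤ s.length ∧
    sub <+: s.drop (PySem.Chars.findFrom s sub (ix : Int) none).toNat ∧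
    (∀ t : Nat, ix ≤ t → t < (PySem.Chars.findFrom s sub (ix : Int) none).toNat → ¬ sub <+: s.drop t) := by
  have hlen : ix ≤ s.length := by
    by_contra hc
    exact h (pvFindFrom_gt_len s sub ix (by omega))
  have hspec := PySem.Chars.findFrom_natCast_spec s sub ix hlen h
  refine ⟨hlen, hspec.1, ?_, hspec.2.1, hspec.2.2⟩
  rw [PySem.Chars.findFrom_natCast s sub ix hlen] at *
  by_cases hf : PySem.Chars.find (s.drop ix) sub = -1
  · simp only [hf, if_pos] at h; exact absurd rfl h
  · rw [if_neg hf] at *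
    have h1 : -1 ≤ PySem.Chars.find (s.drop ix) sub := PySem.Chars.neg_one_le_find _ _
    have h2 : PySem.Chars.find (s.drop ix) sub ≤ ((s.drop ix).length : Int) := PySem.Chars.find_le_length _ _
    have h3 : ((s.drop ix).length : Int) = (s.length : Int) - ix := by
      simp [List.length_drop]; omega
    omega

theorem pvRow_le_width (hs : List String) (i : Nat) : (pvRow hs i).length ≤ pvWidth hs := by
  unfold pvRow pvWidth
  by_cases h : i < hs.length
  · have hg : hs.getD i "" = hs[i] := List.getD_eq_getElem hs "" h
    have hmem : (hs.getD i "").toList.length ∈ hs.map (fun r => r.toList.length) := by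
      rw [hg]
      exact List.mem_map.mpr ⟨hs[i], List.getElem_mem h, rfl⟩
    exact (PySem.List.le_foldl_max _ _).2 _ hmem
  · simp [List.getD_eq_getElem?_getD, List.getElem?_eq_none (by omega : hs.length ≤ i)]

theorem pvLoop_spec (needle hs : List String) (hR : needle ≠ []) :
    ∀ fuel i ix, i + needle.length ≤ hs.length + 1 → pvC needle hs i ix →
    ix ≤ (pvRow hs i).length + 1 →
    (hs.length + 1 - i) * (pvWidth hs + 2) - ix ≤ fuel →
    (aLoop needle hs fuel i ix = true ↔ pvRest needle hs i ix) := by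
  intro fuel
  induction fuel with
  | zero =>
    intro i ix hiN hC hix hfuel
    exfalso
    have hRpos : 0 < needle.length := by cases needle with | nil => exact absurd rfl hR | cons a l => simp
    have hw : ix ≤ pvWidth hs + 1 := le_trans hix (by have := pvRow_le_width hs i; omega)
    have hprod : pvWidth hs + 2 ≤ (hs.length + 1 - i) * (pvWidth hs + 2) :=
      Nat.le_mul_of_pos_left _ (by omega)
    omega
  | succ fuel ih =>
    intro i ix hiN hC hix hfuel
    have hRpos : 0 < needle.length := by cases needle with | nil => exact absurd rfl hR | cons a l => simp
    have hadv := pvAdvance_spec needle hs hR (hs.length + 1) i ix hiN (by omega) hC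
    set P := aAdvance needle hs (hs.length + 1) i ix with hP
    obtain ⟨hle, hlen, heqix, hneix, hrest, hC2, hguard⟩ := hadv
    rw [hrest]
    by_cases hstop : ((P.1 : Int) + needle.length - 1 = hs.length)
    · have hres : aLoop needle hs (fuel+1) i ix = false := by
        simp only [aLoop, ← hP, if_pos hstop]
      rw [hres]
      simp only [Bool.false_eq_true, false_iff]
      rintro ⟨i', j, hii', hlen', _, _⟩
      have : P.1 + needle.length = hs.length + 1 := by omega
      omega
    · have hlt : ((P.1 : Int) + needle.length - 1 < hs.length) := by
        have : P.1 + needle.length ≤ hs.length + 1 := hlen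
        omega
      have hfind : PySem.Chars.findFrom (pvRow hs P.1) (needle.getD 0 "").toList (P.2 : Int) none ≠ -1 := by
        intro hcon; exact hguard ⟨hlt, hcon⟩
      have hPN : P.1 + needle.length ≤ hs.length := by omega
      obtain ⟨hl0, hge, hjlen, hpre, hmin⟩ := pvFindFrom_found _ _ _ hfind
      set j := (PySem.Chars.findFrom (pvRow hs P.1) (needle.getD 0 "").toList (P.2 : Int) none).toNat with hj
      have hPj : P.2 ≤ j := by omega
      have hocc : pvOcc needle hs P.1 j := hpre
      have hmspec := pvMatch_spec needle hs P.1 j hPN needle.length 1 (le_refl 1) hRpos (by omega)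
      by_cases hm : aMatch needle hs j needle.length 1 (P.1 + 1) = needle.length
      · have hres : aLoop needle hs (fuel+1) i ix = true := by
          simp only [aLoop, ← hP, if_neg hstop, ← hj, if_pos hm]
        rw [hres]
        simp only [true_iff]
        refine ⟨P.1, j, le_refl _, hPN, fun _ => hPj, ?_⟩
        intro k hk
        cases k with
        | zero => simpa using pvOcc_slice needle hs P.1 j hocc
        | succ k' => exact hmspec.mp hm (k'+1) (by omega) hk
      · have hres : aLoop needle hs (fuel+1) i ix = aLoop needle hs fuel P.1 (j+1) := by
          simp only [aLoop, ← hP, if_neg hstop, ← hj, if_neg hm]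
        have hnM : ¬ pvMatchAt needle hs P.1 j := by
          intro hM
          apply hm
          exact hmspec.mpr (fun k hk1 hk2 => hM k hk2)
        have hC3 : pvC needle hs P.1 (j+1) := Or.inr ⟨j, by omega, hocc, hnM⟩
        have hfuel2 : (hs.length + 1 - P.1) * (pvWidth hs + 2) - (j+1) ≤ fuel := by
          have hjW : j ≤ pvWidth hs := le_trans hjlen (pvRow_le_width hs P.1)
          have hixW : ix ≤ pvWidth hs + 1 := le_trans hix (by have := pvRow_le_width hs i; omega)
          rcases Nat.eq_or_lt_of_le hle with he | hlt2
          · -- P.1 = i, P.2 = ix, so ix = P.2 ≤ j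
            have hP2 : P.2 = ix := heqix he.symm
            have hixj : ix ≤ j := by omega
            have hprod : pvWidth hs + 2 ≤ (hs.length + 1 - i) * (pvWidth hs + 2) :=
              Nat.le_mul_of_pos_left _ (by omega)
            rw [← he]
            omega
          · have hmul : (hs.length + 1 - P.1) * (pvWidth hs + 2) + (pvWidth hs + 2)
                ≤ (hs.length + 1 - i) * (pvWidth hs + 2) := by
              have h1 : (hs.length + 1 - P.1) + 1 ≤ hs.length + 1 - i := by omega
              calc (hs.length + 1 - P.1) * (pvWidth hs + 2) + (pvWidth hs + 2)
                  = ((hs.length + 1 - P.1) + 1) * (pvWidth hs + 2) := by ring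
                _ ≤ (hs.length + 1 - i) * (pvWidth hs + 2) := Nat.mul_le_mul_right _ h1
            omega
        have hih := ih P.1 (j+1) hlen hC3 (by omega) hfuel2
        rw [hres, hih]
        constructor
        · rintro ⟨i', j', hii', hlen', hcond, hM⟩
          exact ⟨i', j', hii', hlen', fun he => by have := hcond he; omega, hM⟩
        · rintro ⟨i', j', hii', hlen', hcond, hM⟩
          rcases Nat.eq_or_lt_of_le hii' with he | hlt2
          · rcases Nat.lt_or_ge j' (j+1) with hjj | hjj
            · exfalso
              have hj' : P.2 ≤ j' := hcond he.symm
              rcases Nat.lt_or_ge j' j with hjj2 | hjj2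
              · rw [← he] at hM
                exact absurd (pvMatchAt_occ needle hs P.1 j' hR hM) (hmin j' hj' hjj2)
              · have hje : j' = j := by omega
                rw [← he, hje] at hM
                exact hnM hM
            · exact ⟨i', j', hii', hlen', fun _ => hjj, hM⟩
          · exact ⟨i', j', by omega, hlen', fun he => by omega, hM⟩

theorem pvA_iff (needle hs : List String) (hR : needle ≠ []) (hRN : needle.length ≤ hs.length + 1) :
    (is_grid_in_grid needle hs = true ↔
      ∃ i j : Nat, i + needle.length ≤ hs.length ∧ pvMatchAt needle hs i j) := by
  unfold is_grid_in_grid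
  rw [pvLoop_spec needle hs hR _ 0 0 (by omega) (Or.inl rfl) (by omega) (by simp)]
  unfold pvRest
  constructor
  · rintro ⟨i', j, _, hlen, _, hM⟩
    exact ⟨i', j, hlen, hM⟩
  · rintro ⟨i, j, hlen, hM⟩
    exact ⟨i, j, Nat.zero_le _, hlen, fun _ => Nat.zero_le _, hM⟩

theorem pvSliceCol (needle hs : List String) (i j w : Nat) (hiN : i + needle.length ≤ hs.length) :
    (PySem.List.slice
        (hs.map (fun row => PySem.Chars.slice row.toList (some (j : Int)) (some ((j : Int) + (w : Int)))))
        (some (i : Int)) (some ((i : Int) + (needle.length : Int))) = needle.map String.toList)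
    ↔ ∀ k, k < needle.length →
        PySem.Chars.slice ((hs.getD (i+k) "").toList) (some (j : Int)) (some ((j : Int) + (w : Int)))
          = (needle.getD k "").toList := by
  rw [PySem.List.slice_natCast_add]
  set f := fun row : String => PySem.Chars.slice row.toList (some (j : Int)) (some ((j : Int) + (w : Int))) with hf
  have hlenc : ((hs.map f).drop i).length = hs.length - i := by simp
  constructor
  · intro h k hk
    have hik : i + k < hs.length := by omega
    have h1 : k < (((hs.map f).drop i).take needle.length).length := by
      simp only [List.length_take, hlenc]; omega
    have h2 : k < (needle.map String.toList).length := by simp; omega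
    have := List.getElem_of_eq h h1
    simp only [List.getElem_take, List.getElem_drop, List.getElem_map] at this
    rw [List.getD_eq_getElem hs "" hik, List.getD_eq_getElem needle "" hk]
    exact this
  · intro h
    apply List.ext_getElem
    · simp only [List.length_take, hlenc, List.length_map]; omega
    · intro k h1 h2
      simp only [List.getElem_take, List.getElem_drop, List.getElem_map]
      have hk : k < needle.length := by simpa using h2
      have hik : i + k < hs.length := by omega
      have := h k hk
      rw [List.getD_eq_getElem hs "" hik, List.getD_eq_getElem needle "" hk] at this
      exact this

theorem pvB_iff (needle hs : List String) (hR : needle ≠ []) :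
    (is_grid_in_grid_alt needle hs = true ↔
      ∃ i j : Nat, i + needle.length ≤ hs.length ∧ pvMatchAt needle hs i j) := by
  unfold is_grid_in_grid_alt
  simp only [List.any_eq_true, List.mem_range, decide_eq_true_eq]
  constructor
  · rintro ⟨j, hj, i, hi, hslice⟩
    have hiN : i + needle.length ≤ hs.length := by omega
    refine ⟨i, j, hiN, ?_⟩
    intro k hk
    exact (pvSliceCol needle hs i j _ hiN).mp hslice k hk
  · rintro ⟨i, j, hiN, hM⟩
    have hRpos : 0 < needle.length := by cases needle with | nil => exact absurd rfl hR | cons a l => simp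
    by_cases hjW : j ≤ pvWidth hs
    · exact ⟨j, by omega, i, by omega, (pvSliceCol needle hs i j _ hiN).mpr (fun k hk => hM k hk)⟩
    · have hjlen : (pvRow hs i).length ≤ j := by
        have := pvRow_le_width hs i; omega
      have hall := pvMatchAt_high needle hs i j hR hjlen hM
      exact ⟨0, by omega, i, by omega, (pvSliceCol needle hs i 0 _ hiN).mpr (fun k hk => hall i 0 k hk)⟩

-- ===== VERDICT (by name: the statement is the Claim_ definition above) =====
theorem is_grid_in_grid_spec : Claim_equal_is_grid_in_grid := by
  intro needle hs _ hpre
  unfold Spec_is_grid_in_grid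
  rcases hpre with ⟨hR, hRN⟩
  have hA := pvA_iff needle hs hR hRN
  have hB := pvB_iff needle hs hR
  cases hb : is_grid_in_grid_alt needle hs with
  | false =>
    cases ha : is_grid_in_grid needle hs with
    | false => rfl
    | true => exact absurd (hB.mpr (hA.mp ha)) (by simp [hb])
  | true => exact hA.mpr (hB.mp hb)
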